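-- pv_equiv track=rewrite | github.com/DancingOnAir/LeetcodePythonSolution | BitManipulation/1829_maximum_xor_for_each_query.py | getMaximumXor1
-- ===== SOURCE A (Python) =====
-- from typing import List
--
-- def getMaximumXor1(nums: List[int], maximumBit: int) -> List[int]:
--     res = list()
--     max_num = 2 ** maximumBit - 1
--     acc = 0
--     for x in nums:
--         acc ^= x
--         # 下面2种方法均可
--         # res.append(max_num - acc)
--         res.append(max_num ^ acc)
--     return res[::-1]
-- ===== SOURCE B (Python) =====
-- from typing import List
--
-- def getMaximumXor1(nums: List[int], maximumBit: int) -> List[int]: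
--     mask = 2 ** maximumBit - 1
--
--     # go(lst) -> (xor of lst, prefix-XORs of lst listed longest-prefix first),
--     # by divide and conquer: prefixes crossing into the right half are the left
--     # half's total XOR combined with a right-half prefix (XOR is associative).
--     def go(lst):
--         if len(lst) == 1:
--             return lst[0], [lst[0]]
--         mid = len(lst) // 2
--         xl, pl = go(lst[:mid])
--         xr, pr = go(lst[mid:])
--         return xl ^ xr, [xl ^ q for q in pr] + pl
--
--     if not nums:
--         return []
--     return [mask ^ p for p in go(nums)[1]]
-- ===== Notes on version B (the rewrite author's own statement) =====
-- stated objective: alternative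
-- what changed: B computes all prefix XORs by divide and conquer (split in half, combine the right half's prefixes with the left half's total XOR, using associativity of XOR) instead of A's linear forward accumulation followed by a list reversal.
import Mathlib
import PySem

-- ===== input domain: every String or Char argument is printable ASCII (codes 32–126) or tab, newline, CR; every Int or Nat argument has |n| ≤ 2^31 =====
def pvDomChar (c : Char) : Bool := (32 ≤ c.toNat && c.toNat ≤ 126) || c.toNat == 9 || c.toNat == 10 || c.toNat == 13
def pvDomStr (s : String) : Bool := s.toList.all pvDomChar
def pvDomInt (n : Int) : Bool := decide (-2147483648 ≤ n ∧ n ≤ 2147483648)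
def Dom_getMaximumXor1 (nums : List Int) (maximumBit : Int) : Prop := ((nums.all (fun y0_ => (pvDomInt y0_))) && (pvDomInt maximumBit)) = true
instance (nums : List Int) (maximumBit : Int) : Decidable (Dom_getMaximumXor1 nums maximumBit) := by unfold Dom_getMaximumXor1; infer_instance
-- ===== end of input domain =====

-- B replaces A's linear forward prefix-XOR accumulation plus final reversal by a
-- divide-and-conquer computation of all prefix XORs (objective: alternative).

-- ===== PORT A =====
-- res[::-1] is List.reverse; 2 ** maximumBit is 2 ^ maximumBit.toNat, exact for
-- 0 ≤ maximumBit (Pre_ below).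
def getMaximumXor1 (nums : List Int) (maximumBit : Int) : List Int :=
  let max_num : Int := 2 ^ maximumBit.toNat - 1
  ((nums.foldl
      (fun (st : Int × List Int) x =>
        (PySem.Int.bxor st.1 x, st.2 ++ [PySem.Int.bxor max_num (PySem.Int.bxor st.1 x)]))
      ((0 : Int), ([] : List Int))).2).reverse

-- ===== PORT B =====
-- Source B's inner helper go: lst[:mid] / lst[mid:] with 0 ≤ mid ≤ len(lst) are
-- List.take / List.drop (exact: PySem.List.slice_to / slice_from); go is only
-- called on nonempty lists, the [] branch is the vacuous base of the recursion.
def pvGo : List Int → Int × List Int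
  | [] => (0, [])
  | [x] => (x, [x])
  | x :: y :: zs =>
      let l := x :: y :: zs
      let mid := l.length / 2
      let a := pvGo (l.take mid)
      let b := pvGo (l.drop mid)
      (PySem.Int.bxor a.1 b.1, b.2.map (fun q => PySem.Int.bxor a.1 q) ++ a.2)
termination_by l => l.length
decreasing_by
  · simp only [List.length_take, List.length_cons]; omega
  · simp only [List.length_drop, List.length_cons]; omega

def getMaximumXor1_alt (nums : List Int) (maximumBit : Int) : List Int :=
  let mask : Int := 2 ^ maximumBit.toNat - 1
  if nums = [] then []
  else ((pvGo nums).2).map (fun p => PySem.Int.bxor mask p)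

-- ===== PRECONDITION & SPEC =====
-- For maximumBit < 0 and nums nonempty, Python's 2 ** maximumBit is a float and both
-- programs raise TypeError on the first `^`; with nums = [] both return [] untouched.
def Pre_getMaximumXor1 (nums : List Int) (maximumBit : Int) : Prop :=
  0 ≤ maximumBit ∨ nums = []
instance (nums : List Int) (maximumBit : Int) : Decidable (Pre_getMaximumXor1 nums maximumBit) := by
  unfold Pre_getMaximumXor1; infer_instance
def pvWitness_getMaximumXor1 : List Int × Int := ([0, 1, 1, 3], 2)

def Spec_getMaximumXor1 (nums : List Int) (maximumBit : Int) (out : List Int) : Prop := out = getMaximumXor1_alt nums maximumBit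
instance (nums : List Int) (maximumBit : Int) (out : List Int) : Decidable (Spec_getMaximumXor1 nums maximumBit out) := by unfold Spec_getMaximumXor1; infer_instance

-- ===== CLAIM (what is proved, stated in full; the proofs are below) =====
def Claim_equal_getMaximumXor1 : Prop := ∀ (nums : List Int) (maximumBit : Int), Dom_getMaximumXor1 nums maximumBit → Pre_getMaximumXor1 nums maximumBit → Spec_getMaximumXor1 nums maximumBit (getMaximumXor1 nums maximumBit)

-- ===== LEMMAS AND PROOFS =====

-- sign/magnitude view of PySem.Int.bxor, to import Nat.xor's algebra
def pvMag (a : Int) : Nat := if a < 0 then (-a).toNat - 1 else a.toNat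
def pvDec (b : Bool) (n : Nat) : Int := if b then -(n : Int) - 1 else (n : Int)

theorem pvBxor_eq (a b : Int) :
    PySem.Int.bxor a b = pvDec (decide (a < 0) != decide (b < 0)) (pvMag a ^^^ pvMag b) := by
  unfold PySem.Int.bxor pvDec pvMag
  rcases lt_or_ge a 0 with ha | ha <;> rcases lt_or_ge b 0 with hb | hb <;>
    simp [ha, hb, not_lt.mpr, not_le.mpr]

theorem pvMag_dec (b : Bool) (n : Nat) : pvMag (pvDec b n) = n := by
  cases b with
  | false => simp [pvMag, pvDec]
  | true =>
      have h : -(n : Int) - 1 < 0 := by omega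
      simp only [pvDec, pvMag, if_true, if_pos h]
      omega

theorem pvSign_dec (b : Bool) (n : Nat) : decide (pvDec b n < 0) = b := by
  cases b with
  | false => simp [pvDec]
  | true => simp only [pvDec, if_true, decide_eq_true_eq]; omega

theorem pvBxor_assoc (a b c : Int) :
    PySem.Int.bxor (PySem.Int.bxor a b) c = PySem.Int.bxor a (PySem.Int.bxor b c) := by
  rw [pvBxor_eq a b, pvBxor_eq b c, pvBxor_eq, pvBxor_eq, pvMag_dec, pvMag_dec,
    pvSign_dec, pvSign_dec, Nat.xor_assoc]
  congr 1
  cases decide (a < 0) <;> cases decide (b < 0) <;> cases decide (c < 0) <;> rfl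

theorem pvBxor_zero_left (a : Int) : PySem.Int.bxor 0 a = a := by
  rw [PySem.Int.bxor_comm]; simp

theorem pvFoldl_bxor_shift (l : List Int) (a : Int) :
    l.foldl PySem.Int.bxor a = PySem.Int.bxor a (l.foldl PySem.Int.bxor 0) := by
  induction l generalizing a with
  | nil => simp
  | cons x xs ih =>
      simp only [List.foldl_cons]
      rw [ih (PySem.Int.bxor a x), ih (PySem.Int.bxor 0 x), pvBxor_zero_left, pvBxor_assoc]

-- forward prefix XORs of l starting from accumulator a
def pvPref (a : Int) : List Int → List Int
  | [] => []
  | x :: xs => PySem.Int.bxor a x :: pvPref (PySem.Int.bxor a x) xs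

theorem pvPref_shift (l : List Int) (a : Int) :
    pvPref a l = (pvPref 0 l).map (fun q => PySem.Int.bxor a q) := by
  induction l generalizing a with
  | nil => rfl
  | cons x xs ih =>
      simp only [pvPref, pvBxor_zero_left, ih (PySem.Int.bxor a x), ih x, List.map_map,
        List.map_cons]
      congr 1
      apply List.map_congr_left; intro q _
      simp only [Function.comp_apply, pvBxor_assoc]

theorem pvPref_append (l r : List Int) (a : Int) :
    pvPref a (l ++ r) = pvPref a l ++ pvPref (l.foldl PySem.Int.bxor a) r := by
  induction l generalizing a with
  | nil => rfl
  | cons x xs ih => simp [pvPref, ih]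

-- the divide-and-conquer helper computes (total XOR, reversed prefix XORs)
theorem pvGo_eq_aux (n : Nat) (l : List Int) (hn : l.length ≤ n) (h : l ≠ []) :
    pvGo l = (l.foldl PySem.Int.bxor 0, (pvPref 0 l).reverse) := by
  induction n generalizing l with
  | zero =>
      cases l with
      | nil => exact absurd rfl h
      | cons x xs => simp at hn
  | succ n ih =>
      match l with
      | [x] => simp [pvGo, pvPref, pvBxor_zero_left]
      | x :: y :: zs =>
          simp only [pvGo]
          set L : List Int := x :: y :: zs with hL
          set mid : Nat := L.length / 2 with hmid
          have hlen : L.length = zs.length + 2 := by simp [hL]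
          have htlen : (L.take mid).length = mid := by
            simp only [List.length_take]; omega
          have hdlen : (L.drop mid).length = L.length - mid := by
            simp [List.length_drop]
          have htake : L.take mid ≠ [] := by
            intro he; rw [he] at htlen; simp at htlen; omega
          have hdrop : L.drop mid ≠ [] := by
            intro he; rw [he] at hdlen; simp at hdlen; omega
          rw [ih (L.take mid) (by omega) htake, ih (L.drop mid) (by omega) hdrop,
            Prod.mk.injEq]
          have hsplit : L = L.take mid ++ L.drop mid := (List.take_append_drop mid L).symm
          refine ⟨?_, ?_⟩
          · conv_rhs => rw [hsplit]
            rw [List.foldl_append,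
              pvFoldl_bxor_shift (L.drop mid) (List.foldl PySem.Int.bxor 0 (List.take mid L))]
          · conv_rhs => rw [hsplit]
            rw [pvPref_append, List.reverse_append,
              pvPref_shift (L.drop mid) ((L.take mid).foldl PySem.Int.bxor 0),
              List.map_reverse]

theorem pvGo_eq (l : List Int) (h : l ≠ []) :
    pvGo l = (l.foldl PySem.Int.bxor 0, (pvPref 0 l).reverse) :=
  pvGo_eq_aux l.length l le_rfl h

-- A's loop value: the fold's second component is the mask applied over pvPref
theorem pvFoldA_eq (m : Int) (l : List Int) (a : Int) (r : List Int) :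
    (l.foldl
        (fun (st : Int × List Int) x =>
          (PySem.Int.bxor st.1 x, st.2 ++ [PySem.Int.bxor m (PySem.Int.bxor st.1 x)]))
        (a, r)).2 = r ++ (pvPref a l).map (fun p => PySem.Int.bxor m p) := by
  induction l generalizing a r with
  | nil => simp [pvPref]
  | cons x xs ih => simp [pvPref, ih]

-- ===== VERDICT (by name: the statement is the Claim_ definition above) =====
theorem getMaximumXor1_spec : Claim_equal_getMaximumXor1 := by
  intro nums maximumBit _ _
  unfold Spec_getMaximumXor1 getMaximumXor1 getMaximumXor1_alt
  rcases eq_or_ne nums [] with h | h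
  · subst h; rfl
  · rw [if_neg h]
    simp only [pvGo_eq nums h, pvFoldA_eq, List.nil_append, List.map_reverse]
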